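-- pv_equiv track=rewrite | github.com/adgarnier/vena | scripts/framingham_risk.py | get_age_points
-- ===== SOURCE A (Python) =====
-- def get_age_points(age):
--     age_points = {
--         (0, 34): 0,
--         (35, 39): 2,
--         (40, 44): 4,
--         (45, 49): 5,
--         (50, 54): 7,
--         (55, 59): 8,
--         (60, 64): 9,
--         (65, 69): 10,
--         (70, 74): 11,
--         (75, float('inf')): 12
--     }
--     for (lower, upper), points in age_points.items():
--         if lower <= age <= upper:
--             return points
--     raise ValueError('Incorrect age')
-- ===== SOURCE B (Python) =====
-- _THRESHOLDS = [0, 35, 40, 45, 50, 55, 60, 65, 70, 75]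
-- _POINTS = [0, 2, 4, 5, 7, 8, 9, 10, 11, 12]
--
--
-- def get_age_points(age):
--     # binary search for the rightmost threshold <= age
--     lo, hi = 0, len(_THRESHOLDS)
--     while lo < hi:
--         mid = (lo + hi) // 2
--         if age < _THRESHOLDS[mid]:
--             hi = mid
--         else:
--             lo = mid + 1
--     if lo == 0:
--         raise ValueError('Incorrect age')
--     return _POINTS[lo - 1]
-- ===== Notes on version B (the rewrite author's own statement) =====
-- stated objective: alternative
-- what changed: Replaces the linear scan over a dict of (lower,upper) ranges with a binary search over a flat sorted threshold table with parallel points list.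
import Mathlib
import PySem

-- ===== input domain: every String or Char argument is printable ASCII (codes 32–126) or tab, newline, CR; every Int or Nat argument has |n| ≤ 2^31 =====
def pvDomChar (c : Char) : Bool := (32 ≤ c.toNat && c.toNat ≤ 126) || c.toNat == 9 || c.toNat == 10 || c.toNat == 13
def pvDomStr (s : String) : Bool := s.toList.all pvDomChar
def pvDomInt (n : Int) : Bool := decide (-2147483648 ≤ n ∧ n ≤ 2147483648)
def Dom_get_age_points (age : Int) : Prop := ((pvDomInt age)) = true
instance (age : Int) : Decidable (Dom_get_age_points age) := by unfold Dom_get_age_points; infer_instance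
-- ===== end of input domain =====

-- B replaces A's linear scan over (lower,upper)-range dict entries with a binary
-- search over a flat sorted threshold table (objective: alternative algorithm).
-- Both Pythons raise ValueError exactly on negative ages; Pre_ excludes those inputs.


-- ===== PORT A =====
-- the dict of age ranges, in insertion order; upper = none encodes float('inf')
def ageTable : List ((Int × Option Int) × Int) :=
  [((0, some 34), 0), ((35, some 39), 2), ((40, some 44), 4), ((45, some 49), 5),
   ((50, some 54), 7), ((55, some 59), 8), ((60, some 64), 9), ((65, some 69), 10),
   ((70, some 74), 11), ((75, none), 12)]

-- the for-loop with early return; [] = the 'raise ValueError' case (excluded by Pre_)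
def ageScan (age : Int) : List ((Int × Option Int) × Int) → Int
  | [] => 0
  | ((lower, upper), points) :: rest =>
      if lower ≤ age ∧ upper.all (fun u => decide (age ≤ u)) = true then points
      else ageScan age rest

def get_age_points (age : Int) : Int := ageScan age ageTable

-- ===== PORT B =====
def bThresholds : List Int := [0, 35, 40, 45, 50, 55, 60, 65, 70, 75]
def bPoints : List Int := [0, 2, 4, 5, 7, 8, 9, 10, 11, 12]

-- the while-loop of Source B; fuel ≥ hi - lo makes the recursion run to completion
def bSearch (age : Int) : Nat → Nat → Nat → Nat
  | 0, lo, _ => lo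
  | fuel + 1, lo, hi =>
      if lo < hi then
        let mid := (lo + hi) / 2
        if age < bThresholds.getD mid 0 then bSearch age fuel lo mid
        else bSearch age fuel (mid + 1) hi
      else lo

def get_age_points_alt (age : Int) : Int :=
  let lo := bSearch age 10 0 10
  if lo = 0 then 0 else bPoints.getD (lo - 1) 0   -- lo = 0: both Pythons raise (outside Pre_)

-- ===== PRECONDITION & SPEC =====
-- A raises ValueError exactly on negative ages (the last range has no upper bound)
def Pre_get_age_points (age : Int) : Prop := 0 ≤ age
instance (age : Int) : Decidable (Pre_get_age_points age) := by unfold Pre_get_age_points; infer_instance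
def pvWitness_get_age_points : Int := 42

def Spec_get_age_points (age : Int) (out : Int) : Prop := out = get_age_points_alt age
instance (age : Int) (out : Int) : Decidable (Spec_get_age_points age out) := by unfold Spec_get_age_points; infer_instance

-- ===== CLAIM (what is proved, stated in full; the proofs are below) =====
def Claim_equal_get_age_points : Prop := ∀ (age : Int), Dom_get_age_points age → Pre_get_age_points age → Spec_get_age_points age (get_age_points age)

-- ===== LEMMAS AND PROOFS =====

-- binary-search invariant: if t splits lo..hi into thresholds ≤ age vs > age,
-- the loop converges to t (given enough fuel)
theorem bSearch_inv (age : Int) (t : Nat) :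
    ∀ (fuel lo hi : Nat), hi - lo ≤ fuel → lo ≤ t → t ≤ hi →
      (∀ i, lo ≤ i → i < hi → (bThresholds.getD i 0 ≤ age ↔ i < t)) →
      bSearch age fuel lo hi = t := by
  intro fuel
  induction fuel with
  | zero => intro lo hi hf h1 h2 _; simp [bSearch]; omega
  | succ n ih =>
    intro lo hi hf h1 h2 hsplit
    simp only [bSearch]
    split_ifs with hlh hcmp
    · -- age < T[mid] ⇒ t ≤ mid
      have hmid : lo ≤ (lo + hi) / 2 ∧ (lo + hi) / 2 < hi := by omega
      have : ¬ ((lo + hi) / 2 < t) := fun hc =>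
        absurd ((hsplit _ hmid.1 hmid.2).mpr hc) (by omega)
      exact ih lo ((lo + hi) / 2) (by omega) h1 (by omega)
        (fun i hi1 hi2 => hsplit i hi1 (by omega))
    · -- T[mid] ≤ age ⇒ mid < t
      have hmid : lo ≤ (lo + hi) / 2 ∧ (lo + hi) / 2 < hi := by omega
      have : (lo + hi) / 2 < t := (hsplit _ hmid.1 hmid.2).mp (by omega)
      exact ih ((lo + hi) / 2 + 1) hi (by omega) (by omega) h2
        (fun i hi1 hi2 => hsplit i (by omega) hi2)
    · omega

-- for 0 ≤ age there is such a split point t, and it is at least 1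
theorem exists_split (age : Int) (h : 0 ≤ age) :
    ∃ t, 1 ≤ t ∧ t ≤ 10 ∧ ∀ i, i < 10 → (bThresholds.getD i 0 ≤ age ↔ i < t) := by
  by_cases h1 : age ≤ 34
  · exact ⟨1, by norm_num, by norm_num, fun i hi => by interval_cases i <;> simp [bThresholds] <;> omega⟩
  by_cases h2 : age ≤ 39
  · exact ⟨2, by norm_num, by norm_num, fun i hi => by interval_cases i <;> simp [bThresholds] <;> omega⟩
  by_cases h3 : age ≤ 44
  · exact ⟨3, by norm_num, by norm_num, fun i hi => by interval_cases i <;> simp [bThresholds] <;> omega⟩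
  by_cases h4 : age ≤ 49
  · exact ⟨4, by norm_num, by norm_num, fun i hi => by interval_cases i <;> simp [bThresholds] <;> omega⟩
  by_cases h5 : age ≤ 54
  · exact ⟨5, by norm_num, by norm_num, fun i hi => by interval_cases i <;> simp [bThresholds] <;> omega⟩
  by_cases h6 : age ≤ 59
  · exact ⟨6, by norm_num, by norm_num, fun i hi => by interval_cases i <;> simp [bThresholds] <;> omega⟩
  by_cases h7 : age ≤ 64
  · exact ⟨7, by norm_num, by norm_num, fun i hi => by interval_cases i <;> simp [bThresholds] <;> omega⟩
  by_cases h8 : age ≤ 69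
  · exact ⟨8, by norm_num, by norm_num, fun i hi => by interval_cases i <;> simp [bThresholds] <;> omega⟩
  by_cases h9 : age ≤ 74
  · exact ⟨9, by norm_num, by norm_num, fun i hi => by interval_cases i <;> simp [bThresholds] <;> omega⟩
  · exact ⟨10, by norm_num, by norm_num, fun i hi => by interval_cases i <;> simp [bThresholds] <;> omega⟩

-- the binary search lands on the split point of age's interval
theorem bSearch_eq (age : Int) (h : 0 ≤ age) :
    bSearch age 10 0 10 = (if age ≤ 34 then 1 else if age ≤ 39 then 2 else if age ≤ 44 then 3 else if age ≤ 49 then 4 else if age ≤ 54 then 5 else if age ≤ 59 then 6 else if age ≤ 64 then 7 else if age ≤ 69 then 8 else if age ≤ 74 then 9 else 10 : Nat) := by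
  obtain ⟨t, ht1, ht10, htc⟩ := exists_split age h
  rw [bSearch_inv age t 10 0 10 (by omega) (by omega) (by omega) (fun i _ h2 => htc i h2)]
  have c0 := htc 0 (by norm_num)
  have c1 := htc 1 (by norm_num)
  have c2 := htc 2 (by norm_num)
  have c3 := htc 3 (by norm_num)
  have c4 := htc 4 (by norm_num)
  have c5 := htc 5 (by norm_num)
  have c6 := htc 6 (by norm_num)
  have c7 := htc 7 (by norm_num)
  have c8 := htc 8 (by norm_num)
  have c9 := htc 9 (by norm_num)
  norm_num [bThresholds] at c0 c1 c2 c3 c4 c5 c6 c7 c8 c9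
  split_ifs <;> omega

-- one lemma per age interval: the linear scan returns that interval's points

theorem scanEq1 (age : Int) (ha : (0:Int) ≤ age) (hb : age ≤ 34) : ageScan age ageTable = 0 := by
  simp only [ageScan, ageTable, Option.all, decide_eq_true_eq, and_true]
  split_ifs <;> omega

theorem scanEq2 (age : Int) (ha : (35:Int) ≤ age) (hb : age ≤ 39) : ageScan age ageTable = 2 := by
  simp only [ageScan, ageTable, Option.all, decide_eq_true_eq, and_true]
  split_ifs <;> omega

theorem scanEq3 (age : Int) (ha : (40:Int) ≤ age) (hb : age ≤ 44) : ageScan age ageTable = 4 := by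
  simp only [ageScan, ageTable, Option.all, decide_eq_true_eq, and_true]
  split_ifs <;> omega

theorem scanEq4 (age : Int) (ha : (45:Int) ≤ age) (hb : age ≤ 49) : ageScan age ageTable = 5 := by
  simp only [ageScan, ageTable, Option.all, decide_eq_true_eq, and_true]
  split_ifs <;> omega

theorem scanEq5 (age : Int) (ha : (50:Int) ≤ age) (hb : age ≤ 54) : ageScan age ageTable = 7 := by
  simp only [ageScan, ageTable, Option.all, decide_eq_true_eq, and_true]
  split_ifs <;> omega

theorem scanEq6 (age : Int) (ha : (55:Int) ≤ age) (hb : age ≤ 59) : ageScan age ageTable = 8 := by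
  simp only [ageScan, ageTable, Option.all, decide_eq_true_eq, and_true]
  split_ifs <;> omega

theorem scanEq7 (age : Int) (ha : (60:Int) ≤ age) (hb : age ≤ 64) : ageScan age ageTable = 9 := by
  simp only [ageScan, ageTable, Option.all, decide_eq_true_eq, and_true]
  split_ifs <;> omega

theorem scanEq8 (age : Int) (ha : (65:Int) ≤ age) (hb : age ≤ 69) : ageScan age ageTable = 10 := by
  simp only [ageScan, ageTable, Option.all, decide_eq_true_eq, and_true]
  split_ifs <;> omega

theorem scanEq9 (age : Int) (ha : (70:Int) ≤ age) (hb : age ≤ 74) : ageScan age ageTable = 11 := by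
  simp only [ageScan, ageTable, Option.all, decide_eq_true_eq, and_true]
  split_ifs <;> omega

theorem scanEq10 (age : Int) (ha : (75:Int) ≤ age) : ageScan age ageTable = 12 := by
  simp only [ageScan, ageTable, Option.all, decide_eq_true_eq, and_true]
  split_ifs <;> omega


-- the linear scan over the range table, as a chain of interval tests
theorem scan_eq (age : Int) (h : 0 ≤ age) :
    ageScan age ageTable = (if age ≤ 34 then 0 else if age ≤ 39 then 2 else if age ≤ 44 then 4 else if age ≤ 49 then 5 else if age ≤ 54 then 7 else if age ≤ 59 then 8 else if age ≤ 64 then 9 else if age ≤ 69 then 10 else if age ≤ 74 then 11 else 12 : Int) := by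
  split_ifs with g1 g2 g3 g4 g5 g6 g7 g8 g9
  · exact scanEq1 age (by omega) (by omega)
  · exact scanEq2 age (by omega) (by omega)
  · exact scanEq3 age (by omega) (by omega)
  · exact scanEq4 age (by omega) (by omega)
  · exact scanEq5 age (by omega) (by omega)
  · exact scanEq6 age (by omega) (by omega)
  · exact scanEq7 age (by omega) (by omega)
  · exact scanEq8 age (by omega) (by omega)
  · exact scanEq9 age (by omega) (by omega)
  · exact scanEq10 age (by omega)

-- ===== VERDICT (by name: the statement is the Claim_ definition above) =====
theorem get_age_points_spec : Claim_equal_get_age_points := by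
  intro age _ hpre
  unfold Pre_get_age_points at hpre
  unfold Spec_get_age_points get_age_points get_age_points_alt
  rw [scan_eq age hpre, bSearch_eq age hpre]
  split_ifs <;> simp [bPoints]
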